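-- pv_equiv track=rewrite | github.com/junohkwon/Python | ch4_Function_Practice.py | f12
-- ===== SOURCE A (Python) =====
-- def f12(lst):
--     negative_cnt = 0
--     for i in range(0,len(lst)):
--         if lst[i] < 0:
--             negative_cnt += 1
--
--     if negative_cnt == len(lst):
--         return True
--     else:
--         return False
-- ===== SOURCE B (Python) =====
-- def f12(lst):
--     return True if not lst else max(lst) < 0
-- ===== Notes on version B (the rewrite author's own statement) =====
-- stated objective: simpler
-- what changed: Replaces the count-negatives-then-compare-to-length loop by a single aggregate: the list's maximum is computed and tested against 0 (empty list guarded to True).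
import Mathlib
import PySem

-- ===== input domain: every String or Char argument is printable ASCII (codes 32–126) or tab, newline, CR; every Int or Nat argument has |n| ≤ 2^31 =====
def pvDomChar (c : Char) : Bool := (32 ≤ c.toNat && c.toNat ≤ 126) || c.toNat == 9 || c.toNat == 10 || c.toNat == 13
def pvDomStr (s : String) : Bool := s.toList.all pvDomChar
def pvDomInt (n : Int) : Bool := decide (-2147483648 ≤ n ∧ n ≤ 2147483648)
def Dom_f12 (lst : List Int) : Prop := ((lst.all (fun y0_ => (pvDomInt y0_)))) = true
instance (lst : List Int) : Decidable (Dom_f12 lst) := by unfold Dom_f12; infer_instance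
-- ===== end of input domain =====

-- B replaces A's count-negatives-then-compare-to-length decomposition by a single
-- aggregate (max of the list, empty guarded to True) tested once against 0; objective: simpler.

-- ===== PORT A =====
def f12 (lst : List Int) : Bool :=
  let negative_cnt : Int :=
    (PySem.List.pyRange 0 (PySem.List.len lst) 1).foldl
      (fun c i => if PySem.List.pyGetD lst i 0 < 0 then c + 1 else c) 0
  if negative_cnt = PySem.List.len lst then true else false

-- ===== PORT B =====
def f12_alt (lst : List Int) : Bool :=
  if lst.isEmpty then true
  else
    match PySem.List.max? lst (fun y => y) with
    | some m => decide (m < 0)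
    | none => true   -- unreachable: list nonempty

-- ===== PRECONDITION & SPEC =====
def Spec_f12 (lst : List Int) (out : Bool) : Prop := out = f12_alt lst
instance (lst : List Int) (out : Bool) : Decidable (Spec_f12 lst out) := by unfold Spec_f12; infer_instance

-- ===== CLAIM (what is proved, stated in full; the proofs are below) =====
def Claim_equal_f12 : Prop := ∀ (lst : List Int), Dom_f12 lst → Spec_f12 lst (f12 lst)

-- ===== LEMMAS AND PROOFS =====

-- A's counting loop counts exactly the negative elements.
theorem f12_count (lst : List Int) (c : Int) :
    lst.foldl (fun c x => if x < 0 then c + 1 else c) c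
      = c + (lst.countP (fun x => decide (x < 0)) : Int) := by
  induction lst generalizing c with
  | nil => simp
  | cons h t ih =>
    simp only [List.foldl_cons, List.countP_cons, ih]
    by_cases hx : h < 0 <;> simp [hx] <;> ring

-- A returns true iff every element is negative.
theorem f12_iff (lst : List Int) : f12 lst = true ↔ ∀ x ∈ lst, x < 0 := by
  unfold f12
  rw [PySem.List.foldl_pyRange_zero_pyGetD lst 0
        (fun c x => if x < 0 then c + 1 else c) 0, f12_count]
  simp only [PySem.List.len_eq, zero_add]
  constructor
  · intro h
    split at h
    · next hc =>
      have := List.countP_eq_length.mp (by exact_mod_cast hc)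
      intro x hx; simpa using this x hx
    · simp at h
  · intro h
    have : lst.countP (fun x => decide (x < 0)) = lst.length :=
      List.countP_eq_length.mpr (by intro x hx; simpa using h x hx)
    simp [this]

-- B returns true iff every element is negative.
theorem f12_alt_iff (lst : List Int) : f12_alt lst = true ↔ ∀ x ∈ lst, x < 0 := by
  cases lst with
  | nil => simp [f12_alt]
  | cons h t =>
    have hrw : f12_alt (h :: t) = decide (t.foldl max h < 0) := by
      simp [f12_alt, PySem.List.max?_id_cons]
    rw [hrw, decide_eq_true_iff]
    constructor
    · intro hm x hx
      have hmax := PySem.List.le_foldl_max t h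
      rcases List.mem_cons.mp hx with rfl | hxt
      · exact lt_of_le_of_lt hmax.1 hm
      · exact lt_of_le_of_lt (hmax.2 x hxt) hm
    · intro hall
      rcases PySem.List.foldl_max_mem t h with heq | hmem
      · rw [heq]; exact hall h List.mem_cons_self
      · exact hall _ (List.mem_cons_of_mem _ hmem)

-- ===== VERDICT (by name: the statement is the Claim_ definition above) =====
theorem f12_spec : Claim_equal_f12 := by
  intro lst _
  unfold Spec_f12
  by_cases h : ∀ x ∈ lst, x < 0
  · rw [(f12_iff lst).mpr h, (f12_alt_iff lst).mpr h]
  · have ha : f12 lst ≠ true := fun hc => h ((f12_iff lst).mp hc)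
    have hb : f12_alt lst ≠ true := fun hc => h ((f12_alt_iff lst).mp hc)
    simp only [Bool.not_eq_true] at ha hb
    rw [ha, hb]
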